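-- pv_equiv track=rewrite | github.com/piotrsniady/python-exercises-edabit | hard/smallest_missing_positive_integer.py | min_miss_point
-- ===== SOURCE A (Python) =====
-- from typing import List
--
-- def min_miss_point(lst: list) -> List[int]:
--     missing_val = []
--
--     lst.sort()
--     pos_val = list(set([val for val in lst if val > 0]))
--     gen_num_seq = [i for i in range(min(pos_val), max(pos_val) + 1)]
--
--     for j in gen_num_seq:
--         if j not in pos_val:
--             missing_val.append(j)
--
--     return missing_val
-- ===== SOURCE B (Python) =====
-- def min_miss_point(lst: list):
--     lst.sort()
--     uniq = []
--     for v in lst: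
--         if v > 0 and (not uniq or uniq[-1] != v):
--             uniq.append(v)
--     out = []
--     for a, b in zip(uniq, uniq[1:]):
--         out.extend(range(a + 1, b))
--     return out
-- ===== Notes on version B (the rewrite author's own statement) =====
-- stated objective: faster
-- what changed: Instead of generating the full range(min,max+1) and linearly membership-testing each element against the positives list, B walks consecutive pairs of the sorted deduplicated positives and emits each gap range directly, removing the per-element membership scan.
import Mathlib
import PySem

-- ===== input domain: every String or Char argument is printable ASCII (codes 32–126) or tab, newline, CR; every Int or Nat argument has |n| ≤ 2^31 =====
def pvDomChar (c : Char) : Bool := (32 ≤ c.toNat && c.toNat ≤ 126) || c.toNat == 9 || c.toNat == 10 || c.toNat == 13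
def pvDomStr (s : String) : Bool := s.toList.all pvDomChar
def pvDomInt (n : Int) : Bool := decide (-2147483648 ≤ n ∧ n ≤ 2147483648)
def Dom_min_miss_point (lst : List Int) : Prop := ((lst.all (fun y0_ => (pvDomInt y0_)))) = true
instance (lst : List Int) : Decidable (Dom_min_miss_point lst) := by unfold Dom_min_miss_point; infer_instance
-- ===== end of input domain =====

-- B walks consecutive pairs of the sorted deduplicated positives emitting the gap ranges,
-- instead of A's generate-range-then-membership-test; both sort lst in place (same mutation),
-- equivalence proved about the return value on inputs with at least one positive element.


-- ===== PORT A =====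
def min_miss_point (lst : List Int) : List Int :=
  let s := PySem.List.sorted lst (fun x => x) false                       -- lst.sort()
  let pos_val : PySem.Set Int := PySem.Set.ofList (s.filter (fun v => decide (0 < v)))
  match PySem.List.min? pos_val (fun x => x), PySem.List.max? pos_val (fun x => x) with
  | some m, some M =>
      let gen_num_seq := PySem.List.pyRange m (M + 1) 1
      gen_num_seq.foldl (fun acc j => if (!(pos_val.contains j)) = true then acc ++ [j] else acc) []
  | _, _ => []   -- Python raises ValueError (min()/max() of empty sequence) here; excluded by Pre_

-- ===== PORT B =====
def pvUniqGo : List Int → List Int → List Int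
  | acc, [] => acc
  | acc, v :: rest =>
    if 0 < v ∧ acc.getLast? ≠ some v then pvUniqGo (acc ++ [v]) rest      -- v > 0 and (not uniq or uniq[-1] != v)
    else pvUniqGo acc rest

def min_miss_point_alt (lst : List Int) : List Int :=
  let s := PySem.List.sorted lst (fun x => x) false                       -- lst.sort()
  let uniq := pvUniqGo [] s
  (uniq.zip (PySem.List.slice uniq (some 1))).foldl                       -- zip(uniq, uniq[1:])
    (fun out p => out ++ PySem.List.pyRange (p.1 + 1) p.2 1) []           -- out.extend(range(a+1, b))

-- ===== PRECONDITION & SPEC =====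
-- Pre_ excludes exactly the inputs with no positive element, on which A raises ValueError (min() of an empty sequence).
def Pre_min_miss_point (lst : List Int) : Prop := ∃ x ∈ lst, 0 < x
instance (lst : List Int) : Decidable (Pre_min_miss_point lst) := by unfold Pre_min_miss_point; infer_instance
def pvWitness_min_miss_point : List Int := [3, 1, 3, -2]

def Spec_min_miss_point (lst : List Int) (out : List Int) : Prop := out = min_miss_point_alt lst
instance (lst : List Int) (out : List Int) : Decidable (Spec_min_miss_point lst out) := by unfold Spec_min_miss_point; infer_instance

-- ===== CLAIM (what is proved, stated in full; the proofs are below) =====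
def Claim_equal_min_miss_point : Prop := ∀ (lst : List Int), Dom_min_miss_point lst → Pre_min_miss_point lst → Spec_min_miss_point lst (min_miss_point lst)

-- ===== LEMMAS AND PROOFS =====

-- every element of a strictly increasing list is at most its last element
lemma pv_le_getLast : ∀ {u : List Int}, u.Pairwise (· < ·) → ∀ {a : Int}, a ∈ u → ∀ (hne : u ≠ []), a ≤ u.getLast hne := by
  intro u
  induction u with
  | nil => intro _ a ha; simp at ha
  | cons x t ih =>
    intro h a ha hne
    cases t with
    | nil => simp_all
    | cons y t' =>
      rw [List.getLast_cons (by simp)]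
      rcases List.mem_cons.mp ha with rfl | hat
      · exact le_of_lt (List.rel_of_pairwise_cons h (List.getLast_mem _))
      · exact ih h.of_cons hat (by simp)

-- the head of a strictly increasing list is at most every element
lemma pv_head_le : ∀ {u : List Int}, u.Pairwise (· < ·) → ∀ {a : Int}, a ∈ u → ∀ (hne : u ≠ []), u.head hne ≤ a := by
  intro u h a ha hne
  cases u with
  | nil => simp at ha
  | cons x t =>
    rcases List.mem_cons.mp ha with rfl | hat
    · simp
    · exact le_of_lt (List.rel_of_pairwise_cons h hat)

-- invariant of B's dedup loop over a sorted list
lemma pvUniqGo_spec : ∀ (s acc : List Int),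
    s.Pairwise (· ≤ ·) → acc.Pairwise (· < ·) → (∀ a ∈ acc, ∀ v ∈ s, a ≤ v) →
    (pvUniqGo acc s).Pairwise (· < ·) ∧ (∀ x, x ∈ pvUniqGo acc s ↔ x ∈ acc ∨ (x ∈ s ∧ 0 < x)) := by
  intro s
  induction s with
  | nil => intro acc _ hacc _; exact ⟨hacc, by simp [pvUniqGo]⟩
  | cons v rest ih =>
    intro acc hs hacc hle
    rw [pvUniqGo]
    by_cases hc : 0 < v ∧ acc.getLast? ≠ some v
    · rw [if_pos hc]
      have hlt : ∀ a ∈ acc, a < v := by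
        intro a ha
        rcases lt_or_eq_of_le (hle a ha v (by simp)) with h | h
        · exact h
        · exfalso
          have hne : acc ≠ [] := by rintro rfl; simp at ha
          have h1 : a ≤ acc.getLast hne := pv_le_getLast hacc ha hne
          have h2 : acc.getLast hne ≤ v := hle _ (List.getLast_mem hne) v (by simp)
          have : acc.getLast hne = v := le_antisymm h2 (h ▸ h1)
          exact hc.2 (by rw [List.getLast?_eq_some_getLast hne, this])
      have hacc' : (acc ++ [v]).Pairwise (· < ·) := by
        rw [List.pairwise_append]
        exact ⟨hacc, by simp, by simpa using hlt⟩
      have hle' : ∀ a ∈ acc ++ [v], ∀ w ∈ rest, a ≤ w := by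
        intro a ha w hw
        rcases List.mem_append.mp ha with h | h
        · exact hle a h w (by simp [hw])
        · simp at h; subst h; exact List.rel_of_pairwise_cons hs hw
      obtain ⟨p1, p2⟩ := ih (acc ++ [v]) hs.of_cons hacc' hle'
      refine ⟨p1, fun x => ?_⟩
      rw [p2 x]
      constructor
      · rintro (h | h)
        · rcases List.mem_append.mp h with h | h
          · exact Or.inl h
          · simp at h; subst h; exact Or.inr ⟨by simp, hc.1⟩
        · exact Or.inr ⟨by simp [h.1], h.2⟩
      · rintro (h | ⟨h, hp⟩)
        · exact Or.inl (List.mem_append.mpr (Or.inl h))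
        · rcases List.mem_cons.mp h with rfl | h
          · exact Or.inl (by simp)
          · exact Or.inr ⟨h, hp⟩
    · rw [if_neg hc]
      have hle' : ∀ a ∈ acc, ∀ w ∈ rest, a ≤ w := fun a ha w hw => hle a ha w (by simp [hw])
      obtain ⟨p1, p2⟩ := ih acc hs.of_cons hacc hle'
      refine ⟨p1, fun x => ?_⟩
      rw [p2 x]
      constructor
      · rintro (h | h)
        · exact Or.inl h
        · exact Or.inr ⟨by simp [h.1], h.2⟩
      · rintro (h | ⟨h, hp⟩)
        · exact Or.inl h
        · rcases List.mem_cons.mp h with rfl | h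
          · -- v was skipped: either v ≤ 0 (contradicts hp) or v = last of acc, so v ∈ acc
            rcases not_and_or.mp hc with h' | h'
            · exact absurd hp h'
            · rw [not_ne_iff] at h'
              have hne : acc ≠ [] := by
                rintro rfl; simp at h'
              rw [List.getLast?_eq_some_getLast hne] at h'
              have := List.getLast_mem hne
              rw [Option.some_inj.mp h'] at this
              exact Or.inl this
          · exact Or.inr ⟨h, hp⟩

-- gap-walk over a strictly increasing list = range filtered by non-membership
lemma pv_gaps_eq : ∀ (u : List Int), u.Pairwise (· < ·) → ∀ (hne : u ≠ []),
    (u.zip u.tail).flatMap (fun p => PySem.List.pyRange (p.1 + 1) p.2 1)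
      = (PySem.List.pyRange (u.head hne) (u.getLast hne + 1) 1).filter (fun j => !(u.contains j)) := by
  intro u
  induction u with
  | nil => intro _ hne; simp at hne
  | cons x t ih =>
    intro h hne
    cases t with
    | nil =>
      simp [PySem.List.pyRange_one_singleton, List.filter]
    | cons y t' =>
      have hxy : x < y := List.rel_of_pairwise_cons h (by simp)
      have hne' : (y :: t') ≠ [] := by simp
      have hyb : y ≤ (y :: t').getLast hne' := pv_le_getLast h.of_cons (by simp) hne'
      have hb := List.getLast_cons (a := x) hne'
      -- split the big range at x, x+1 and y
      have hsplit1 : PySem.List.pyRange x ((x :: y :: t').getLast hne + 1) 1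
          = x :: (PySem.List.pyRange (x + 1) y 1 ++ PySem.List.pyRange y ((y :: t').getLast hne' + 1) 1) := by
        rw [hb, PySem.List.pyRange_one_cons (by omega), PySem.List.pyRange_one_append (x + 1) y _ (by omega) (by omega)]
      simp only [List.tail_cons, List.zip_cons_cons, List.flatMap_cons, List.head_cons]
      rw [hsplit1, List.filter_cons_of_neg (by simp), List.filter_append]
      have hmid : (PySem.List.pyRange (x + 1) y 1).filter (fun j => !((x :: y :: t').contains j))
          = PySem.List.pyRange (x + 1) y 1 := by
        rw [List.filter_eq_self]
        intro a ha
        rw [PySem.List.mem_pyRange_one] at ha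
        simp only [Bool.not_eq_eq_eq_not, Bool.not_true, ← Bool.not_eq_true, List.contains_iff_mem]
        intro hmem
        rcases List.mem_cons.mp hmem with rfl | hmem
        · omega
        · have : y ≤ a := pv_head_le h.of_cons hmem hne'
          omega
      have htl : (PySem.List.pyRange y ((y :: t').getLast hne' + 1) 1).filter (fun j => !((x :: y :: t').contains j))
          = (PySem.List.pyRange y ((y :: t').getLast hne' + 1) 1).filter (fun j => !((y :: t').contains j)) := by
        apply List.filter_congr
        intro a ha
        rw [PySem.List.mem_pyRange_one] at ha
        simp only [List.contains_cons, Bool.not_or]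
        have hax : (a == x) = false := by simp; omega
        rw [hax]
        simp
      have ihe := ih h.of_cons hne'
      simp only [List.tail_cons, List.head_cons] at ihe
      rw [hmid, htl, ihe]

-- ===== VERDICT (by name: the statement is the Claim_ definition above) =====
theorem min_miss_point_spec : Claim_equal_min_miss_point := by
  intro lst _ hpre
  unfold Spec_min_miss_point
  have hs : (PySem.List.sorted lst (fun x => x) false).Pairwise (· ≤ ·) := by
    simpa using PySem.List.sorted_pairwise lst (fun x => x)
  obtain ⟨hu_pw, hu_mem⟩ := pvUniqGo_spec (PySem.List.sorted lst (fun x => x) false) [] hs (by simp) (by simp)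
  obtain ⟨x0, hx0, hx0p⟩ := hpre
  have hx0s : x0 ∈ PySem.List.sorted lst (fun x => x) false := (PySem.List.mem_sorted lst _ false x0).mpr hx0
  have hx0u : x0 ∈ pvUniqGo [] (PySem.List.sorted lst (fun x => x) false) := (hu_mem x0).mpr (by simp [hx0s, hx0p])
  have hune : pvUniqGo [] (PySem.List.sorted lst (fun x => x) false) ≠ [] := by
    rintro h; rw [h] at hx0u; simp at hx0u
  -- membership in A's set of positives = membership in B's dedup list
  have hmempos : ∀ x, x ∈ PySem.Set.ofList ((PySem.List.sorted lst (fun x => x) false).filter (fun v => decide (0 < v)))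
      ↔ x ∈ pvUniqGo [] (PySem.List.sorted lst (fun x => x) false) := by
    intro x
    rw [PySem.Set.mem_ofList, List.mem_filter, hu_mem x]
    simp
  have hx0pos : x0 ∈ PySem.Set.ofList ((PySem.List.sorted lst (fun x => x) false).filter (fun v => decide (0 < v))) :=
    (hmempos x0).mpr hx0u
  have hpos_ne : PySem.Set.ofList ((PySem.List.sorted lst (fun x => x) false).filter (fun v => decide (0 < v))) ≠ [] := by
    rintro h; rw [h] at hx0pos; simp at hx0pos
  obtain ⟨m, hm⟩ : ∃ m, PySem.List.min? (PySem.Set.ofList ((PySem.List.sorted lst (fun x => x) false).filter (fun v => decide (0 < v)))) (fun x => x) = some m := by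
    cases h : PySem.List.min? (PySem.Set.ofList ((PySem.List.sorted lst (fun x => x) false).filter (fun v => decide (0 < v)))) (fun x => x) with
    | none => exact absurd ((PySem.List.min?_eq_none_iff _ _).mp h) hpos_ne
    | some m => exact ⟨m, rfl⟩
  obtain ⟨M, hM⟩ : ∃ M, PySem.List.max? (PySem.Set.ofList ((PySem.List.sorted lst (fun x => x) false).filter (fun v => decide (0 < v)))) (fun x => x) = some M := by
    cases h : PySem.List.max? (PySem.Set.ofList ((PySem.List.sorted lst (fun x => x) false).filter (fun v => decide (0 < v)))) (fun x => x) with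
    | none => exact absurd ((PySem.List.max?_eq_none_iff _ _).mp h) hpos_ne
    | some M => exact ⟨M, rfl⟩
  -- min is the head of the dedup list, max its last element
  have hmu : m ∈ pvUniqGo [] (PySem.List.sorted lst (fun x => x) false) := (hmempos m).mp (PySem.List.min?_mem hm)
  have hMu : M ∈ pvUniqGo [] (PySem.List.sorted lst (fun x => x) false) := (hmempos M).mp (PySem.List.max?_mem hM)
  have hhead : (pvUniqGo [] (PySem.List.sorted lst (fun x => x) false)).head hune = m := by
    apply le_antisymm
    · exact pv_head_le hu_pw hmu hune
    · exact PySem.List.min?_isMin hm _ ((hmempos _).mpr (List.head_mem hune))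
  have hlast : (pvUniqGo [] (PySem.List.sorted lst (fun x => x) false)).getLast hune = M := by
    apply le_antisymm
    · exact PySem.List.max?_isMax hM _ ((hmempos _).mpr (List.getLast_mem hune))
    · exact pv_le_getLast hu_pw hMu hune
  -- A's value: the range filtered by non-membership in the dedup list
  have hA : min_miss_point lst
      = (PySem.List.pyRange m (M + 1) 1).filter (fun j => !((pvUniqGo [] (PySem.List.sorted lst (fun x => x) false)).contains j)) := by
    unfold min_miss_point
    simp only [hm, hM]
    rw [PySem.List.foldl_append_if (fun j => !((PySem.Set.ofList ((PySem.List.sorted lst (fun x => x) false).filter (fun v => decide (0 < v)))).contains j)) (fun j => j)]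
    rw [List.map_id']
    simp only [List.nil_append]
    apply List.filter_congr
    intro j _
    have h2 : j ∈ pvUniqGo [] (PySem.List.sorted lst (fun x => x) false) ↔ j ∈ lst ∧ 0 < j := by
      rw [hu_mem j, PySem.List.mem_sorted]
      simp
    by_cases hj1 : j ∈ lst <;> by_cases hj2 : 0 < j <;> simp [h2, hj1, hj2]
  -- B's value: the gap walk over the dedup list
  have hB : min_miss_point_alt lst
      = ((pvUniqGo [] (PySem.List.sorted lst (fun x => x) false)).zip (pvUniqGo [] (PySem.List.sorted lst (fun x => x) false)).tail).flatMap (fun p => PySem.List.pyRange (p.1 + 1) p.2 1) := by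
    simp only [min_miss_point_alt]
    rw [PySem.List.slice_from _ (by norm_num : (0:Int) ≤ 1), PySem.List.foldl_append_eq_flatMap]
    norm_num [List.drop_one]
  rw [hA, hB, pv_gaps_eq _ hu_pw hune, hhead, hlast]
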